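-- pv_equiv track=rewrite | github.com/fasterthanlime/whisper | rust/bee-roll/scripts/render_timeline.py | render_tick_row
-- ===== SOURCE A (Python) =====
-- def clamp(value: int, low: int, high: int) -> int:
--     return max(low, min(high, value))
--
-- def ms_to_col(ms: int, ms_per_col: int) -> int:
--     return ms // ms_per_col
--
-- def render_tick_row(width: int, ms_per_col: int, tick_ms: int) -> str:
--     cells = [" "] * width
--     tick = 0
--     total_ms = width * ms_per_col
--     while tick <= total_ms:
--         col = clamp(ms_to_col(tick, ms_per_col), 0, width - 1)
--         cells[col] = "|"
--         tick += tick_ms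
--     return "".join(cells).rstrip()
-- ===== SOURCE B (Python) =====
-- def render_tick_row(width: int, ms_per_col: int, tick_ms: int) -> str:
--     total_ms = width * ms_per_col
--     if total_ms < 0:
--         return ""
--     cells = []
--     for col in range(width):
--         lo = col * ms_per_col
--         hi = total_ms if col == width - 1 else (col + 1) * ms_per_col - 1
--         # marked iff some tick multiple k*tick_ms lands in [lo, hi]
--         cells.append("|" if lo <= (hi // tick_ms) * tick_ms else " ")
--     return "".join(cells).rstrip()
-- ===== Notes on version B (the rewrite author's own statement) =====
-- stated objective: alternative
-- what changed: Instead of stepping through every tick from 0 to width*ms_per_col and stamping its (clamped) column, B iterates once over the width columns and marks a column iff the largest tick multiple not exceeding the column's last millisecond still reaches its first millisecond, a closed-form divisibility test per column.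
import Mathlib
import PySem

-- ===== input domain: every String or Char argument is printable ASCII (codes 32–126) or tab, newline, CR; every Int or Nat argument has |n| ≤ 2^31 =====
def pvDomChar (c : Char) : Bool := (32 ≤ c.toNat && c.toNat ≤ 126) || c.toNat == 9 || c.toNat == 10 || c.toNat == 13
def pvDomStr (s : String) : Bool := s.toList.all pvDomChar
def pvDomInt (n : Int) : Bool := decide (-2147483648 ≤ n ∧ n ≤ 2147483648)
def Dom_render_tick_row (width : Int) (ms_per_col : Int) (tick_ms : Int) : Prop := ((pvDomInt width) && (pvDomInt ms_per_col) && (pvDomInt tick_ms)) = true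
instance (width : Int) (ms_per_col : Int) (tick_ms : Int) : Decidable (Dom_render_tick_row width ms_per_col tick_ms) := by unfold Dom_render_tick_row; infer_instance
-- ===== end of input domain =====

-- B replaces A's per-tick stamping loop by a single pass over the width columns with a
-- closed-form per-column test; equivalence is proved on Pre_, the inputs where Python A returns.

-- ===== PORT A =====
def clampA (value : Int) (low : Int) (high : Int) : Int := max low (min high value)

def ms_to_colA (ms : Int) (ms_per_col : Int) : Int := PySem.Int.floordiv ms ms_per_col

-- the while loop, fuelled; fuel (total_ms.toNat + 2) is enough on every input where the
-- Python loop terminates (tick_ms ≥ 1, or a negative total_ms = zero iterations)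
def loopA (width : Int) (ms_per_col : Int) (tick_ms : Int) (total_ms : Int) :
    Nat → List Char → Int → List Char
  | 0, cells, _ => cells
  | fuel+1, cells, tick =>
    if tick ≤ total_ms then
      loopA width ms_per_col tick_ms total_ms fuel
        (cells.set (clampA (ms_to_colA tick ms_per_col) 0 (width - 1)).toNat '|') (tick + tick_ms)
    else cells

def render_tick_row (width : Int) (ms_per_col : Int) (tick_ms : Int) : String :=
  let total_ms := width * ms_per_col
  -- cells = [" "] * width, "".join(cells).rstrip()
  PySem.Str.rstrip (String.mk
    (loopA width ms_per_col tick_ms total_ms (total_ms.toNat + 2) (List.replicate width.toNat ' ') 0))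

-- ===== PORT B =====
def render_tick_row_alt (width : Int) (ms_per_col : Int) (tick_ms : Int) : String :=
  let total_ms := width * ms_per_col
  if total_ms < 0 then "" else
    PySem.Str.rstrip (String.mk
      ((PySem.List.pyRange 0 width 1).map (fun col =>
        let lo := col * ms_per_col
        let hi := if col == width - 1 then total_ms else (col + 1) * ms_per_col - 1
        if lo ≤ PySem.Int.floordiv hi tick_ms * tick_ms then '|' else ' ')))

-- ===== PRECONDITION & SPEC =====
-- Pre_ excludes exactly the inputs where Python A does not return: with the loop entered
-- (width*ms_per_col ≥ 0), ms_per_col = 0 raises ZeroDivisionError, width ≤ 0 raises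
-- IndexError, and tick_ms ≤ 0 makes the while loop run forever.
def Pre_render_tick_row (width : Int) (ms_per_col : Int) (tick_ms : Int) : Prop :=
  width * ms_per_col < 0 ∨ (1 ≤ width ∧ 1 ≤ ms_per_col ∧ 1 ≤ tick_ms)

instance (width : Int) (ms_per_col : Int) (tick_ms : Int) : Decidable (Pre_render_tick_row width ms_per_col tick_ms) := by unfold Pre_render_tick_row; infer_instance

def pvWitness_render_tick_row : Int × Int × Int := (5, 3, 4)

def Spec_render_tick_row (width : Int) (ms_per_col : Int) (tick_ms : Int) (out : String) : Prop := out = render_tick_row_alt width ms_per_col tick_ms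
instance (width : Int) (ms_per_col : Int) (tick_ms : Int) (out : String) : Decidable (Spec_render_tick_row width ms_per_col tick_ms out) := by unfold Spec_render_tick_row; infer_instance

-- ===== CLAIM (what is proved, stated in full; the proofs are below) =====
def Claim_equal_render_tick_row : Prop := ∀ (width : Int) (ms_per_col : Int) (tick_ms : Int), Dom_render_tick_row width ms_per_col tick_ms → Pre_render_tick_row width ms_per_col tick_ms → Spec_render_tick_row width ms_per_col tick_ms (render_tick_row width ms_per_col tick_ms)

-- ===== LEMMAS AND PROOFS =====

-- the column index A stamps for millisecond x
def idxA (width : Int) (ms_per_col : Int) (x : Int) : Nat :=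
  (clampA (ms_to_colA x ms_per_col) 0 (width - 1)).toNat

lemma loopA_length (w m t total : Int) :
    ∀ (fuel : Nat) (cells : List Char) (tick : Int),
      (loopA w m t total fuel cells tick).length = cells.length := by
  intro fuel
  induction fuel with
  | zero => intro cells tick; simp [loopA]
  | succ n ih =>
    intro cells tick
    simp only [loopA]
    split
    · rw [ih]; simp
    · rfl

lemma loopA_getElem? (w m t total : Int) (ht : 1 ≤ t) :
    ∀ (fuel : Nat) (cells : List Char) (tick : Int) (c : Nat),
      c < cells.length → total < tick + (fuel : Int) * t →
      ((∃ k : Nat, tick + (k : Int) * t ≤ total ∧ idxA w m (tick + (k : Int) * t) = c) →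
        (loopA w m t total fuel cells tick)[c]? = some '|') ∧
      (¬ (∃ k : Nat, tick + (k : Int) * t ≤ total ∧ idxA w m (tick + (k : Int) * t) = c) →
        (loopA w m t total fuel cells tick)[c]? = cells[c]?) := by
  intro fuel
  induction fuel with
  | zero =>
    intro cells tick c hc hfuel
    simp only [Nat.cast_zero, zero_mul, add_zero] at hfuel
    constructor
    · rintro ⟨k, hk, -⟩
      have : (0 : Int) ≤ (k : Int) * t := mul_nonneg (Int.natCast_nonneg k) (by omega)
      omega
    · intro _; simp [loopA]
  | succ n ih =>
    intro cells tick c hc hfuel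
    by_cases hle : tick ≤ total
    · have hstep : loopA w m t total (n + 1) cells tick =
          loopA w m t total n (cells.set (clampA (ms_to_colA tick m) 0 (w - 1)).toNat '|') (tick + t) := by
        simp [loopA, hle]
      have hfuel' : total < (tick + t) + (n : Int) * t := by
        push_cast at hfuel
        nlinarith [hfuel]
      have hc' : c < (cells.set (clampA (ms_to_colA tick m) 0 (w - 1)).toNat '|').length := by
        simpa using hc
      have ih' := ih (cells.set (clampA (ms_to_colA tick m) 0 (w - 1)).toNat '|') (tick + t) c hc' hfuel'
      have harg : ∀ j : Nat, tick + ((j + 1 : Nat) : Int) * t = (tick + t) + (j : Int) * t := by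
        intro j; push_cast; ring
      have hiff : (∃ k : Nat, (tick + t) + (k : Int) * t ≤ total ∧ idxA w m ((tick + t) + (k : Int) * t) = c)
          ∨ idxA w m tick = c ↔
          (∃ k : Nat, tick + (k : Int) * t ≤ total ∧ idxA w m (tick + (k : Int) * t) = c) := by
        constructor
        · rintro (⟨k, hk1, hk2⟩ | h0)
          · refine ⟨k + 1, ?_, ?_⟩
            · rw [harg k]; exact hk1
            · rw [harg k]; exact hk2
          · refine ⟨0, ?_, ?_⟩
            · simpa using hle
            · simpa using h0
        · rintro ⟨k, hk1, hk2⟩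
          cases k with
          | zero => right; simpa using hk2
          | succ j =>
            left
            refine ⟨j, ?_, ?_⟩
            · rw [← harg j]; exact hk1
            · rw [← harg j]; exact hk2
      rw [hstep]
      constructor
      · intro hex
        by_cases hsh : ∃ k : Nat, (tick + t) + (k : Int) * t ≤ total ∧ idxA w m ((tick + t) + (k : Int) * t) = c
        · exact ih'.1 hsh
        · have h0 : idxA w m tick = c := by
            rcases hiff.mpr hex with h | h
            · exact absurd h hsh
            · exact h
          rw [ih'.2 hsh, List.getElem?_set]
          have : (clampA (ms_to_colA tick m) 0 (w - 1)).toNat = c := h0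
          simp [this, hc]
      · intro hnex
        have hsh : ¬ ∃ k : Nat, (tick + t) + (k : Int) * t ≤ total ∧ idxA w m ((tick + t) + (k : Int) * t) = c :=
          fun h => hnex (hiff.mp (Or.inl h))
        have h0 : idxA w m tick ≠ c := fun h => hnex (hiff.mp (Or.inr h))
        rw [ih'.2 hsh, List.getElem?_set]
        have hne : (clampA (ms_to_colA tick m) 0 (w - 1)).toNat ≠ c := h0
        simp [hne]
    · have hstep : loopA w m t total (n + 1) cells tick = cells := by
        simp [loopA, hle]
      constructor
      · rintro ⟨k, hk, -⟩
        have : (0 : Int) ≤ (k : Int) * t := mul_nonneg (Int.natCast_nonneg k) (by omega)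
        omega
      · intro _; rw [hstep]

-- A stamps column c at millisecond x (0 ≤ x ≤ total) iff x lies in c's bracket [lo, hi]
lemma idxA_eq_iff (w m : Int) (hw : 1 ≤ w) (hm : 1 ≤ m) (x : Int) (hx0 : 0 ≤ x)
    (hxt : x ≤ w * m) (c : Nat) (hcw : (c : Int) < w) :
    idxA w m x = c ↔
      (c : Int) * m ≤ x ∧ x ≤ (if (c : Int) = w - 1 then w * m else ((c : Int) + 1) * m - 1) := by
  have hm' : (0 : Int) < m := by omega
  have hd0 : 0 ≤ PySem.Int.floordiv x m :=
    (PySem.Int.le_floordiv_iff_mul_le hm').mpr (by simpa using hx0)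
  have hclamp : clampA (ms_to_colA x m) 0 (w - 1) = min (w - 1) (PySem.Int.floordiv x m) := by
    unfold clampA ms_to_colA
    omega
  have hkey : idxA w m x = c ↔ min (w - 1) (PySem.Int.floordiv x m) = (c : Int) := by
    unfold idxA
    rw [hclamp]
    omega
  rw [hkey]
  by_cases hlast : (c : Int) = w - 1
  · simp only [if_pos hlast]
    constructor
    · intro hmin
      have hge : w - 1 ≤ PySem.Int.floordiv x m := by omega
      have hlow := (PySem.Int.le_floordiv_iff_mul_le hm').mp hge
      refine ⟨?_, hxt⟩
      rw [hlast]; exact hlow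
    · rintro ⟨hlo, -⟩
      have hlo' : (w - 1) * m ≤ x := by rw [← hlast]; exact hlo
      have hge : w - 1 ≤ PySem.Int.floordiv x m :=
        (PySem.Int.le_floordiv_iff_mul_le hm').mpr hlo'
      omega
  · simp only [if_neg hlast]
    constructor
    · intro hmin
      have hdiv : PySem.Int.floordiv x m = (c : Int) := by omega
      have := (PySem.Int.floordiv_eq_iff_of_pos hm').mp hdiv
      omega
    · rintro ⟨hlo, hhi⟩
      have hdiv : PySem.Int.floordiv x m = (c : Int) :=
        (PySem.Int.floordiv_eq_iff_of_pos hm').mpr ⟨hlo, by omega⟩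
      omega

-- a tick multiple lands in [lo, hi] iff the largest multiple ≤ hi still reaches lo
lemma exists_multiple_iff (t lo hi : Int) (ht : 1 ≤ t) (hlo : 0 ≤ lo) :
    (∃ k : Nat, lo ≤ (k : Int) * t ∧ (k : Int) * t ≤ hi) ↔
      lo ≤ PySem.Int.floordiv hi t * t := by
  have ht' : (0 : Int) < t := by omega
  constructor
  · rintro ⟨k, hk1, hk2⟩
    have hkle : (k : Int) ≤ PySem.Int.floordiv hi t :=
      (PySem.Int.le_floordiv_iff_mul_le ht').mpr hk2
    have := mul_le_mul_of_nonneg_right hkle (by omega : (0:Int) ≤ t)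
    linarith
  · intro h
    have hfle : PySem.Int.floordiv hi t * t ≤ hi := by
      have := (PySem.Int.le_floordiv_iff_mul_le ht').mp (le_refl (PySem.Int.floordiv hi t))
      exact this
    have hq0 : 0 ≤ PySem.Int.floordiv hi t := by
      by_contra hneg
      push_neg at hneg
      have : PySem.Int.floordiv hi t * t ≤ -1 * t := by
        exact mul_le_mul_of_nonneg_right (by omega) (by omega)
      omega
    refine ⟨(PySem.Int.floordiv hi t).toNat, ?_, ?_⟩
    · rwa [Int.toNat_of_nonneg hq0]
    · rwa [Int.toNat_of_nonneg hq0]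

lemma mk_toList (l : List Char) : (String.mk l).toList = l :=
  Eq.symm ((fun {l} {s} => String.ofList_eq.mp) rfl)

lemma rstrip_spaces (n : Nat) :
    PySem.Str.rstrip (String.mk (List.replicate n ' ')) = "" := by
  have h : (PySem.Str.rstrip (String.mk (List.replicate n ' '))).toList = ([] : List Char) := by
    rw [PySem.Str.toList_rstrip, mk_toList]
    simp only [PySem.Chars.rstrip, List.reverse_eq_nil_iff, List.dropWhile_eq_nil_iff]
    intro x hx
    rw [List.mem_reverse] at hx
    rw [List.eq_of_mem_replicate hx]
    decide
  calc PySem.Str.rstrip (String.mk (List.replicate n ' '))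
      = String.ofList (PySem.Str.rstrip (String.mk (List.replicate n ' '))).toList :=
        String.ofList_toList.symm
    _ = "" := by rw [h]

-- main agreement of the cell lists in the positive case
lemma cells_eq (w m t : Int) (hw : 1 ≤ w) (hm : 1 ≤ m) (ht : 1 ≤ t) :
    loopA w m t (w * m) ((w * m).toNat + 2) (List.replicate w.toNat ' ') 0 =
      (PySem.List.pyRange 0 w 1).map (fun col =>
        let lo := col * m
        let hi := if col == w - 1 then w * m else (col + 1) * m - 1
        if lo ≤ PySem.Int.floordiv hi t * t then '|' else ' ') := by
  apply List.ext_getElem?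
  intro c
  have hwnat : ((w.toNat : Int)) = w := Int.toNat_of_nonneg (by omega)
  by_cases hcw : c < w.toNat
  · have hclen : c < (List.replicate w.toNat ' ').length := by simpa using hcw
    have hfuel : w * m < 0 + (((w * m).toNat + 2 : Nat) : Int) * t := by
      have h1 : w * m ≤ ((w * m).toNat : Int) := Int.self_le_toNat _
      have h2 : (((w * m).toNat + 2 : Nat) : Int) ≤ (((w * m).toNat + 2 : Nat) : Int) * t :=
        le_mul_of_one_le_right (by positivity) ht
      push_cast at h2 ⊢
      omega
    have hloop := loopA_getElem? w m t (w * m) ht ((w * m).toNat + 2) (List.replicate w.toNat ' ') 0 c hclen hfuel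
    simp only [zero_add] at hloop
    have hrange : ((PySem.List.pyRange 0 w 1).map (fun col =>
        let lo := col * m
        let hi := if col == w - 1 then w * m else (col + 1) * m - 1
        if lo ≤ PySem.Int.floordiv hi t * t then '|' else ' '))[c]? =
        some (if (c : Int) * m ≤ PySem.Int.floordiv
            (if (c : Int) = w - 1 then w * m else ((c : Int) + 1) * m - 1) t * t then '|' else ' ') := by
      have h := PySem.List.getElem?_map_pyRange_zero (fun col =>
        let lo := col * m
        let hi := if col == w - 1 then w * m else (col + 1) * m - 1
        if lo ≤ PySem.Int.floordiv hi t * t then '|' else ' ') w.toNat c hcw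
      rw [hwnat] at h
      simpa [beq_iff_eq] using h
    rw [hrange]
    have hcwi : (c : Int) < w := by omega
    have hhile : (if (c : Int) = w - 1 then w * m else ((c : Int) + 1) * m - 1) ≤ w * m := by
      split
      · omega
      · rename_i hne
        have hc1 : (c : Int) + 1 ≤ w := by omega
        nlinarith
    have hiff : (∃ k : Nat, (k : Int) * t ≤ w * m ∧ idxA w m ((k : Int) * t) = c) ↔
        (c : Int) * m ≤ PySem.Int.floordiv
          (if (c : Int) = w - 1 then w * m else ((c : Int) + 1) * m - 1) t * t := by
      rw [← exists_multiple_iff t ((c : Int) * m)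
            (if (c : Int) = w - 1 then w * m else ((c : Int) + 1) * m - 1) ht
            (mul_nonneg (by positivity) (by omega))]
      constructor
      · rintro ⟨k, hk1, hk2⟩
        have hx0 : (0:Int) ≤ (k : Int) * t := mul_nonneg (by positivity) (by omega)
        have := (idxA_eq_iff w m hw hm ((k : Int) * t) hx0 hk1 c hcwi).mp hk2
        exact ⟨k, this.1, this.2⟩
      · rintro ⟨k, hk1, hk2⟩
        have hx0 : (0:Int) ≤ (k : Int) * t := mul_nonneg (by positivity) (by omega)
        have hkt : (k : Int) * t ≤ w * m := le_trans hk2 hhile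
        exact ⟨k, hkt, (idxA_eq_iff w m hw hm ((k : Int) * t) hx0 hkt c hcwi).mpr ⟨hk1, hk2⟩⟩
    by_cases hex : ∃ k : Nat, (k : Int) * t ≤ w * m ∧ idxA w m ((k : Int) * t) = c
    · rw [hloop.1 hex, if_pos (hiff.mp hex)]
    · rw [hloop.2 hex, if_neg (fun h => hex (hiff.mpr h))]
      simp [List.getElem?_replicate, hcw]
  · have h1 : (loopA w m t (w * m) ((w * m).toNat + 2) (List.replicate w.toNat ' ') 0)[c]? = none := by
      apply List.getElem?_eq_none
      rw [loopA_length]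
      simpa using Nat.le_of_not_lt hcw
    have h2 : ((PySem.List.pyRange 0 w 1).map (fun col =>
        let lo := col * m
        let hi := if col == w - 1 then w * m else (col + 1) * m - 1
        if lo ≤ PySem.Int.floordiv hi t * t then '|' else ' '))[c]? = none := by
      apply List.getElem?_eq_none
      rw [List.length_map, PySem.List.length_pyRange_one]
      omega
    rw [h1, h2]

-- ===== VERDICT (by name: the statement is the Claim_ definition above) =====
theorem render_tick_row_spec : Claim_equal_render_tick_row := by
  intro w m t _ hpre
  unfold Spec_render_tick_row
  rcases hpre with hneg | ⟨hw, hm, ht⟩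
  · -- total_ms < 0: the while loop never runs, both sides are the empty row
    have hA : render_tick_row w m t = "" := by
      show PySem.Str.rstrip (String.mk
        (loopA w m t (w * m) ((w * m).toNat + 2) (List.replicate w.toNat ' ') 0)) = ""
      have hz : (w * m).toNat = 0 := by omega
      rw [hz]
      have hloop : loopA w m t (w * m) (0 + 2) (List.replicate w.toNat ' ') 0 =
          List.replicate w.toNat ' ' := by
        simp only [loopA]
        rw [if_neg (by omega)]
      rw [hloop, rstrip_spaces]
    have hB : render_tick_row_alt w m t = "" := by
      show (if w * m < 0 then "" else _) = ""
      rw [if_pos hneg]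
    rw [hA, hB]
  · have hpos : ¬ w * m < 0 := by nlinarith
    have hA : render_tick_row w m t = PySem.Str.rstrip (String.mk
        ((PySem.List.pyRange 0 w 1).map (fun col =>
          let lo := col * m
          let hi := if col == w - 1 then w * m else (col + 1) * m - 1
          if lo ≤ PySem.Int.floordiv hi t * t then '|' else ' '))) := by
      show PySem.Str.rstrip (String.mk
        (loopA w m t (w * m) ((w * m).toNat + 2) (List.replicate w.toNat ' ') 0)) = _
      rw [cells_eq w m t hw hm ht]
    have hB : render_tick_row_alt w m t = PySem.Str.rstrip (String.mk
        ((PySem.List.pyRange 0 w 1).map (fun col =>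
          let lo := col * m
          let hi := if col == w - 1 then w * m else (col + 1) * m - 1
          if lo ≤ PySem.Int.floordiv hi t * t then '|' else ' '))) := by
      show (if w * m < 0 then "" else _) = _
      rw [if_neg hpos]
    rw [hA, hB]
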